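-- pv_equiv track=rewrite | github.com/RobsonOlv/exception-miner | nexgen/task2/prepare.py | get_try_index
-- ===== SOURCE A (Python) =====
-- def get_try_index(code):
--     start = 0
--     stack = []
--     for i, token in enumerate(code.split()):
--         if token == "try":  # and not stack:
--             start = i
--         elif token in ["'", '"']:
--             if stack:
--                 if stack[-1] == token:
--                     stack.pop()
--             else:
--                 stack.append(token)
--     return start
-- ===== SOURCE B (Python) =====
-- def get_try_index(code):
--     for i, token in reversed(list(enumerate(code.split()))):
--         if token == "try":
--             return i
--     return 0
-- ===== Notes on version B (the rewrite author's own statement) =====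
-- stated objective: simpler
-- what changed: Scan the token list from the end and return at the first 'try' (the last occurrence), dropping A's overwritten accumulator and its dead quote-stack bookkeeping entirely.
import Mathlib
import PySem

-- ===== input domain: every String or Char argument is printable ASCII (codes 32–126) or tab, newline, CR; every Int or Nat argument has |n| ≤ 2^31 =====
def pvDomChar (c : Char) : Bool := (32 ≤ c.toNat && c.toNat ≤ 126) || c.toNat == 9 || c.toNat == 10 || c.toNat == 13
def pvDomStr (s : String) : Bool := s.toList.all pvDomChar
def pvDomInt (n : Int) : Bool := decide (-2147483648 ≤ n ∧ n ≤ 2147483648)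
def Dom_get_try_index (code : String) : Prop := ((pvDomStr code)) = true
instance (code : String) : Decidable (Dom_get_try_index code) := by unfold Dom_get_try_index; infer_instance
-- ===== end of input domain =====

-- B replaces A's forward loop (overwriting accumulator + dead quote-stack bookkeeping)
-- by a reverse scan that returns at the first 'try' found; objective: simpler.

-- ===== PORT A =====
-- one step of A's loop body: state (start, stack), item (i, token)
def pvAStep (st : Int × List String) (p : Int × String) : Int × List String :=
  if p.2 = "try" then (p.1, st.2)
  else if p.2 = "'" ∨ p.2 = "\"" then
    match st.2 with
    | [] => (st.1, st.2 ++ [p.2])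
    | _ :: _ => if st.2.getLast? = some p.2 then (st.1, st.2.dropLast) else (st.1, st.2)
  else st

def get_try_index (code : String) : Int :=
  (List.foldl pvAStep (0, []) (PySem.List.enumerate (PySem.Str.split₀ code))).1

-- ===== PORT B =====
-- the reversed for-loop with early return; falls through to 0
def pvBFind : List (Int × String) → Int
  | [] => 0
  | (i, t) :: rest => if t = "try" then i else pvBFind rest

def get_try_index_alt (code : String) : Int :=
  pvBFind (PySem.List.enumerate (PySem.Str.split₀ code)).reverse

-- ===== PRECONDITION & SPEC =====
def Spec_get_try_index (code : String) (out : Int) : Prop := out = get_try_index_alt code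
instance (code : String) (out : Int) : Decidable (Spec_get_try_index code out) := by unfold Spec_get_try_index; infer_instance

-- ===== CLAIM (what is proved, stated in full; the proofs are below) =====
def Claim_equal_get_try_index : Prop := ∀ (code : String), Dom_get_try_index code → Spec_get_try_index code (get_try_index code)

-- ===== LEMMAS AND PROOFS =====

-- B's search, generalized over the fall-through default
def pvBFindD (d : Int) : List (Int × String) → Int
  | [] => d
  | (i, t) :: rest => if t = "try" then i else pvBFindD d rest

theorem pvBFind_eq_D (l : List (Int × String)) : pvBFind l = pvBFindD 0 l := by
  induction l with
  | nil => rfl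
  | cons p rest ih => cases p; simp [pvBFind, pvBFindD, ih]

theorem pvBFindD_append_single (xs : List (Int × String)) (d i : Int) (t : String) :
    pvBFindD d (xs ++ [(i, t)]) = pvBFindD (if t = "try" then i else d) xs := by
  induction xs with
  | nil => by_cases h : t = "try" <;> simp [pvBFindD, h]
  | cons p rest ih => cases p; simp only [List.cons_append, pvBFindD, ih]

theorem pvAStep_fst (st : Int × List String) (p : Int × String) :
    (pvAStep st p).1 = if p.2 = "try" then p.1 else st.1 := by
  rcases st with ⟨s, stk⟩
  cases stk <;> simp only [pvAStep] <;> split_ifs <;> rfl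

theorem pvFold_eq_find (l : List (Int × String)) :
    ∀ (s : Int) (st : List String),
      (List.foldl pvAStep (s, st) l).1 = pvBFindD s l.reverse := by
  induction l with
  | nil => intro s st; rfl
  | cons p rest ih =>
    intro s st
    simp only [List.foldl_cons, List.reverse_cons]
    rcases h : pvAStep (s, st) p with ⟨s', st'⟩
    have hs : s' = if p.2 = "try" then p.1 else s := by
      have := pvAStep_fst (s, st) p; rw [h] at this; exact this
    cases p with
    | mk i t =>
      rw [ih s' st', pvBFindD_append_single]
      simp only at hs
      rw [hs]

theorem get_try_index_spec : Claim_equal_get_try_index := by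
  intro code _
  unfold Spec_get_try_index get_try_index get_try_index_alt
  rw [pvBFind_eq_D, pvFold_eq_find]
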